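-- pv_equiv track=rewrite | github.com/Abductcows/aoc24 | d2p1.py | is_safe_sequence
-- ===== SOURCE A (Python) =====
-- def is_safe_sequence(nums):
--     increasing = nums[0] < nums[1]
--
--     for i in range(len(nums) - 1):
--         test1 = nums[i] == nums[i + 1]
--         test2 = nums[i + 1] > nums[i] and not increasing
--         test3 = nums[i + 1] < nums[i] and increasing
--         test4 = nums[i + 1] > nums[i] + 3 and increasing
--         test5 = nums[i + 1] + 3 < nums[i] and not increasing
--
--         if test1 or test2 or test3 or test4 or test5:
--             return False
--
--     return True
-- ===== SOURCE B (Python) =====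
-- def is_safe_sequence(nums):
--     increasing = nums[0] < nums[1]
--     diffs = [b - a for a, b in zip(nums, nums[1:])]
--     lo, hi = min(diffs), max(diffs)
--     if increasing:
--         return lo >= 1 and hi <= 3
--     return lo >= -3 and hi <= -1
-- ===== Notes on version B (the rewrite author's own statement) =====
-- stated objective: simpler
-- what changed: A's per-pair early-return scan with five boolean tests is replaced by building the list of adjacent differences and checking only its minimum and maximum against the allowed band (1 to 3 when increasing, -3 to -1 otherwise).
import Mathlib
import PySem

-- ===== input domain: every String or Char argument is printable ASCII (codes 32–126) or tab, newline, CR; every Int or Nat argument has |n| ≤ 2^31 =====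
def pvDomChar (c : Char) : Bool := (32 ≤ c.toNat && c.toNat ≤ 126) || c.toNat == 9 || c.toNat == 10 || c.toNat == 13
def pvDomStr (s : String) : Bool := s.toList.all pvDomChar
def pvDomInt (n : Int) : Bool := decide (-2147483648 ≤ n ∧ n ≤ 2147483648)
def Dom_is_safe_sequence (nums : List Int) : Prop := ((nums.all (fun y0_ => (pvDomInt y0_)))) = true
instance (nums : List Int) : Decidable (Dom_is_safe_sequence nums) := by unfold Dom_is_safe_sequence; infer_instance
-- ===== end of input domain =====

-- B replaces A's per-pair early-return scan by a reduce: it builds the list of adjacent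
-- differences and checks only its minimum and maximum against the allowed band (simpler).

-- ===== PORT A =====
-- the loop body of A: check one index i, early-return False on a violation
def isSafeLoop (nums : List Int) (increasing : Bool) : List Int → Bool
  | [] => true
  | i :: rest =>
    let x := PySem.List.pyGetD nums i 0
    let y := PySem.List.pyGetD nums (i + 1) 0
    let test1 := x == y
    let test2 := y > x && !increasing
    let test3 := y < x && increasing
    let test4 := y > x + 3 && increasing
    let test5 := y + 3 < x && !increasing
    if test1 || test2 || test3 || test4 || test5 then false
    else isSafeLoop nums increasing rest

def is_safe_sequence (nums : List Int) : Bool :=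
  match PySem.List.pyGet? nums 0, PySem.List.pyGet? nums 1 with
  | some a, some b =>
    let increasing := decide (a < b)
    isSafeLoop nums increasing (PySem.List.pyRange 0 (PySem.List.len nums - 1) 1)
  | _, _ => false  -- IndexError in Python; outside Pre_

-- ===== PORT B =====
def is_safe_sequence_alt (nums : List Int) : Bool :=
  match PySem.List.pyGet? nums 0 with
  | none => false  -- IndexError in Python; outside Pre_
  | some a =>
    match PySem.List.pyGet? nums 1 with
    | none => false  -- IndexError in Python; outside Pre_
    | some b =>
      let increasing := decide (a < b)
      let diffs := (nums.zip (nums.drop 1)).map (fun p => p.2 - p.1)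
      match PySem.List.min? diffs (fun d => d) with
      | none => false  -- ValueError on empty diffs; unreachable under Pre_
      | some lo =>
        match PySem.List.max? diffs (fun d => d) with
        | none => false  -- ValueError on empty diffs; unreachable under Pre_
        | some hi =>
          if increasing then decide (1 ≤ lo) && decide (hi ≤ 3)
          else decide (-3 ≤ lo) && decide (hi ≤ -1)

-- ===== PRECONDITION & SPEC =====
-- A raises IndexError on lists of length < 2 (nums[1]); B raises there too.
def Pre_is_safe_sequence (nums : List Int) : Prop := 2 ≤ nums.length
instance (nums : List Int) : Decidable (Pre_is_safe_sequence nums) := by unfold Pre_is_safe_sequence; infer_instance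
def pvWitness_is_safe_sequence : List Int := [1, 2, 3]

def Spec_is_safe_sequence (nums : List Int) (out : Bool) : Prop := out = is_safe_sequence_alt nums
instance (nums : List Int) (out : Bool) : Decidable (Spec_is_safe_sequence nums out) := by unfold Spec_is_safe_sequence; infer_instance

-- ===== CLAIM (what is proved, stated in full; the proofs are below) =====
def Claim_equal_is_safe_sequence : Prop := ∀ (nums : List Int), Dom_is_safe_sequence nums → Pre_is_safe_sequence nums → Spec_is_safe_sequence nums (is_safe_sequence nums)

-- ===== LEMMAS AND PROOFS =====

-- A's loop is an 'all' over the index list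
lemma isSafeLoop_eq_all (nums : List Int) (inc : Bool) (idxs : List Int) :
    isSafeLoop nums inc idxs =
      idxs.all (fun i =>
        let x := PySem.List.pyGetD nums i 0
        let y := PySem.List.pyGetD nums (i + 1) 0
        !(x == y || (y > x && !inc) || (y < x && inc) || (y > x + 3 && inc) || (y + 3 < x && !inc))) := by
  induction idxs with
  | nil => rfl
  | cons i rest ih =>
    simp only [isSafeLoop, List.all_cons]
    split_ifs with h
    · simp [h]
    · simp [h, ih]

-- the zip of a list with its own tail, by index
lemma zip_drop_one_getElem (nums : List Int) (k : Nat) (h : k < (nums.zip (nums.drop 1)).length) :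
    (nums.zip (nums.drop 1))[k] = (nums[k]'(by simp at h; omega), nums[k+1]'(by simp at h; omega)) := by
  simp at h
  simp [List.getElem_zip]

lemma length_zip_drop_one (nums : List Int) :
    (nums.zip (nums.drop 1)).length = nums.length - 1 := by
  simp

-- membership in the diff list, characterised by indices
lemma mem_diffs_iff (nums : List Int) (d : Int) :
    d ∈ (nums.zip (nums.drop 1)).map (fun p => p.2 - p.1) ↔
      ∃ k : Nat, ∃ h : k + 1 < nums.length, nums[k+1] - nums[k]'(by omega) = d := by
  rw [List.mem_map]
  constructor
  · rintro ⟨p, hp, rfl⟩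
    obtain ⟨k, hk, hget⟩ := List.getElem_of_mem hp
    have hk' : k + 1 < nums.length := by rw [length_zip_drop_one] at hk; omega
    exact ⟨k, hk', by rw [← hget, zip_drop_one_getElem nums k hk]⟩
  · rintro ⟨k, hk, rfl⟩
    have hk' : k < (nums.zip (nums.drop 1)).length := by rw [length_zip_drop_one]; omega
    refine ⟨(nums.zip (nums.drop 1))[k], List.getElem_mem hk', ?_⟩
    rw [zip_drop_one_getElem nums k hk']

-- both sides equal the bounded-band condition on all adjacent differences
lemma alt_true_iff (nums : List Int) (h2 : 2 ≤ nums.length) (a b : Int)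
    (ha : PySem.List.pyGet? nums 0 = some a) (hb : PySem.List.pyGet? nums 1 = some b) :
    is_safe_sequence_alt nums = true ↔
      (∀ k : Nat, ∀ h : k + 1 < nums.length,
        if a < b then 1 ≤ nums[k+1] - nums[k]'(by omega) ∧ nums[k+1] - nums[k]'(by omega) ≤ 3
        else -3 ≤ nums[k+1] - nums[k]'(by omega) ∧ nums[k+1] - nums[k]'(by omega) ≤ -1) := by
  have hdne : (nums.zip (nums.drop 1)).map (fun p => p.2 - p.1) ≠ [] := by
    intro hnil
    have := congrArg List.length hnil
    simp at this
    omega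
  unfold is_safe_sequence_alt
  rw [ha, hb]
  simp only
  set diffs := (nums.zip (nums.drop 1)).map (fun p => p.2 - p.1) with hdiffs
  obtain ⟨lo, hlo⟩ : ∃ lo, PySem.List.min? diffs (fun d => d) = some lo := by
    cases hm : PySem.List.min? diffs (fun d => d) with
    | none => exact absurd ((PySem.List.min?_eq_none_iff diffs _).mp hm) hdne
    | some lo => exact ⟨lo, rfl⟩
  obtain ⟨hi, hhi⟩ : ∃ hi, PySem.List.max? diffs (fun d => d) = some hi := by
    cases hm : PySem.List.max? diffs (fun d => d) with
    | none => exact absurd ((PySem.List.max?_eq_none_iff diffs _).mp hm) hdne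
    | some hi => exact ⟨hi, rfl⟩
  rw [hlo, hhi]
  have hlomem := PySem.List.min?_mem hlo
  have hhimem := PySem.List.max?_mem hhi
  have hlomin := PySem.List.min?_isMin hlo
  have hhimax := PySem.List.max?_isMax hhi
  have hband : ∀ c₁ c₂ : Int,
      ((decide (c₁ ≤ lo) && decide (hi ≤ c₂)) = true ↔ ∀ d ∈ diffs, c₁ ≤ d ∧ d ≤ c₂) := by
    intro c₁ c₂
    simp only [Bool.and_eq_true, decide_eq_true_eq]
    constructor
    · rintro ⟨h1, h2⟩ d hd
      exact ⟨le_trans h1 (hlomin d hd), le_trans (hhimax d hd) h2⟩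
    · intro hall
      exact ⟨(hall lo hlomem).1, (hall hi hhimem).2⟩
  have hforall : ∀ c₁ c₂ : Int,
      ((∀ d ∈ diffs, c₁ ≤ d ∧ d ≤ c₂) ↔
        ∀ k : Nat, ∀ h : k + 1 < nums.length,
          c₁ ≤ nums[k+1] - nums[k]'(by omega) ∧ nums[k+1] - nums[k]'(by omega) ≤ c₂) := by
    intro c₁ c₂
    constructor
    · intro hall k hk
      exact hall _ ((mem_diffs_iff nums _).mpr ⟨k, hk, rfl⟩)
    · intro hall d hd
      obtain ⟨k, hk, rfl⟩ := (mem_diffs_iff nums d).mp hd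
      exact hall k hk
  by_cases hab : a < b
  · simp only [hab, decide_true, if_true, hband 1 3, hforall 1 3]
  · simp only [hab, decide_false, if_false, Bool.false_eq_true, hband (-3) (-1), hforall (-3) (-1)]

-- one pair of A's five tests, as a band membership
lemma pair_band (inc : Bool) (x y : Int) :
    (!(x == y || (y > x && !inc) || (y < x && inc) || (y > x + 3 && inc) || (y + 3 < x && !inc))) = true ↔
      (if inc = true then 1 ≤ y - x ∧ y - x ≤ 3 else -3 ≤ y - x ∧ y - x ≤ -1) := by
  cases inc <;> simp <;> omega

lemma a_true_iff (nums : List Int) (_h2 : 2 ≤ nums.length) (a b : Int)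
    (ha : PySem.List.pyGet? nums 0 = some a) (hb : PySem.List.pyGet? nums 1 = some b) :
    is_safe_sequence nums = true ↔
      (∀ k : Nat, ∀ h : k + 1 < nums.length,
        if a < b then 1 ≤ nums[k+1] - nums[k]'(by omega) ∧ nums[k+1] - nums[k]'(by omega) ≤ 3
        else -3 ≤ nums[k+1] - nums[k]'(by omega) ∧ nums[k+1] - nums[k]'(by omega) ≤ -1) := by
  unfold is_safe_sequence
  rw [ha, hb]
  simp only [isSafeLoop_eq_all, List.all_eq_true]
  constructor
  · intro hall k hk
    have hmem : (k : Int) ∈ PySem.List.pyRange 0 (PySem.List.len nums - 1) 1 := by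
      rw [PySem.List.mem_pyRange_one]
      simp [PySem.List.len_eq]
      omega
    have := hall _ hmem
    simp only at this
    have hx : PySem.List.pyGetD nums (k : Int) 0 = nums[k]'(by omega) :=
      PySem.List.pyGetD_ofNat nums k 0 (by omega)
    have hy : PySem.List.pyGetD nums ((k : Int) + 1) 0 = nums[k+1] := by
      have : ((k : Int) + 1) = ((k + 1 : Nat) : Int) := by push_cast; ring
      rw [this]
      exact PySem.List.pyGetD_ofNat nums (k+1) 0 hk
    rw [hx, hy] at this
    have h' := (pair_band (decide (a < b)) _ _).mp this
    by_cases hab : a < b <;> simp [hab] at h' ⊢ <;> exact h'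
  · intro hall i hi
    rw [PySem.List.mem_pyRange_one] at hi
    simp [PySem.List.len_eq] at hi
    obtain ⟨hi0, hi1⟩ := hi
    obtain ⟨k, rfl⟩ : ∃ k : Nat, i = (k : Int) := ⟨i.toNat, by omega⟩
    have hk : k + 1 < nums.length := by omega
    have := hall k hk
    have hx : PySem.List.pyGetD nums (k : Int) 0 = nums[k]'(by omega) :=
      PySem.List.pyGetD_ofNat nums k 0 (by omega)
    have hy : PySem.List.pyGetD nums ((k : Int) + 1) 0 = nums[k+1] := by
      have he : ((k : Int) + 1) = ((k + 1 : Nat) : Int) := by push_cast; ring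
      rw [he]
      exact PySem.List.pyGetD_ofNat nums (k+1) 0 hk
    simp only [hx, hy]
    rw [pair_band (decide (a < b))]
    by_cases hab : a < b <;> simp [hab] at this ⊢ <;> exact this

-- ===== VERDICT (by name: the statement is the Claim_ definition above) =====
theorem is_safe_sequence_spec : Claim_equal_is_safe_sequence := by
  intro nums _ hpre
  unfold Pre_is_safe_sequence at hpre
  unfold Spec_is_safe_sequence
  obtain ⟨a, ha⟩ : ∃ a, PySem.List.pyGet? nums 0 = some a := by
    cases h : PySem.List.pyGet? nums 0 with
    | none =>
      rw [PySem.List.pyGet?_eq_none_iff] at h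
      exact absurd (by unfold PySem.Raise.InRange; omega) h
    | some a => exact ⟨a, rfl⟩
  obtain ⟨b, hb⟩ : ∃ b, PySem.List.pyGet? nums 1 = some b := by
    cases h : PySem.List.pyGet? nums 1 with
    | none =>
      rw [PySem.List.pyGet?_eq_none_iff] at h
      exact absurd (by unfold PySem.Raise.InRange; omega) h
    | some b => exact ⟨b, rfl⟩
  have h1 := a_true_iff nums hpre a b ha hb
  have h2 := alt_true_iff nums hpre a b ha hb
  cases hA : is_safe_sequence nums <;> cases hB : is_safe_sequence_alt nums
  · rfl
  · exact absurd (h1.mpr (h2.mp hB)) (by simp [hA])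
  · exact absurd (h2.mpr (h1.mp hA)) (by simp [hB])
  · rfl
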